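-- pv_equiv track=rewrite | github.com/duanyhui/RoboTwin_distillation | policy/RDT/visualize_action_diff.py | build_joint_labels
-- ===== SOURCE A (Python) =====
-- def build_joint_labels(dim: int):
--     if dim == 14:
--         return [
--             "L_J1",
--             "L_J2",
--             "L_J3",
--             "L_J4",
--             "L_J5",
--             "L_J6",
--             "L_Grip",
--             "R_J1",
--             "R_J2",
--             "R_J3",
--             "R_J4",
--             "R_J5",
--             "R_J6",
--             "R_Grip",
--         ]
--     if dim == 16:
--         return [
--             "L_J1",
--             "L_J2",
--             "L_J3",
--             "L_J4",
--             "L_J5",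
--             "L_J6",
--             "L_J7",
--             "L_Grip",
--             "R_J1",
--             "R_J2",
--             "R_J3",
--             "R_J4",
--             "R_J5",
--             "R_J6",
--             "R_J7",
--             "R_Grip",
--         ]
--     return [f"Dim{i}" for i in range(dim)]
-- ===== SOURCE B (Python) =====
-- def build_joint_labels(dim: int):
--     if dim in (14, 16):
--         njoints = dim // 2 - 1
--         labels = []
--         for side in ("L", "R"):
--             for j in range(1, njoints + 1):
--                 labels.append(f"{side}_J{j}")
--             labels.append(f"{side}_Grip")
--         return labels
--     return [f"Dim{i}" for i in range(dim)]
-- ===== Notes on version B (the rewrite author's own statement) =====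
-- stated objective: simpler
-- what changed: Replaces the two hard-coded 14/16-element literal lists with a nested loop over sides and joint indices derived from dim//2-1, keeping the Dim-default for other dims.
import Mathlib
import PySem

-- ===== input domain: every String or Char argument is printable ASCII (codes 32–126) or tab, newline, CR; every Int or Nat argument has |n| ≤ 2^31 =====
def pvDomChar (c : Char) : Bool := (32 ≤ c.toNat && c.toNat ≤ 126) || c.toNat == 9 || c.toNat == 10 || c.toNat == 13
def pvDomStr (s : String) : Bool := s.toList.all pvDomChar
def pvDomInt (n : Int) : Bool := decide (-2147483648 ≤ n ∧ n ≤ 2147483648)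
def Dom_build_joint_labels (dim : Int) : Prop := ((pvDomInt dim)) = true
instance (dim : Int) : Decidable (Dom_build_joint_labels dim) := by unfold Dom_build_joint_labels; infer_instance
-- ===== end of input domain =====

-- B replaces the hard-coded 14/16 label lists with a nested side/joint loop (objective: simpler).


-- ===== PORT A =====
def build_joint_labels (dim : Int) : List String :=
  if dim = 14 then
    ["L_J1", "L_J2", "L_J3", "L_J4", "L_J5", "L_J6", "L_Grip",
     "R_J1", "R_J2", "R_J3", "R_J4", "R_J5", "R_J6", "R_Grip"]
  else if dim = 16 then
    ["L_J1", "L_J2", "L_J3", "L_J4", "L_J5", "L_J6", "L_J7", "L_Grip",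
     "R_J1", "R_J2", "R_J3", "R_J4", "R_J5", "R_J6", "R_J7", "R_Grip"]
  else
    (PySem.List.pyRange 0 dim 1).map (fun i => "Dim" ++ PySem.Int.toStr i)

-- ===== PORT B =====
-- B builds the 14/16-dim arm labels by a nested loop over sides and joint indices.
def build_joint_labels_alt (dim : Int) : List String :=
  if dim = 14 ∨ dim = 16 then
    let njoints := PySem.Int.floordiv dim 2 - 1
    ["L", "R"].foldl
      (fun labels side =>
        ((PySem.List.pyRange 1 (njoints + 1) 1).foldl
          (fun acc j => acc ++ [side ++ "_J" ++ PySem.Int.toStr j]) labels)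
          ++ [side ++ "_Grip"])
      []
  else
    (PySem.List.pyRange 0 dim 1).map (fun i => "Dim" ++ PySem.Int.toStr i)

-- ===== PRECONDITION & SPEC =====
def Spec_build_joint_labels (dim : Int) (out : List String) : Prop := out = build_joint_labels_alt dim
instance (dim : Int) (out : List String) : Decidable (Spec_build_joint_labels dim out) := by unfold Spec_build_joint_labels; infer_instance

-- ===== CLAIM (what is proved, stated in full; the proofs are below) =====
def Claim_equal_build_joint_labels : Prop := ∀ (dim : Int), Dom_build_joint_labels dim → Spec_build_joint_labels dim (build_joint_labels dim)

-- ===== LEMMAS AND PROOFS =====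

-- ===== VERDICT (by name: the statement is the Claim_ definition above) =====
theorem build_joint_labels_spec : Claim_equal_build_joint_labels := by
  intro dim _
  unfold Spec_build_joint_labels
  by_cases h14 : dim = 14
  · subst h14; decide
  · by_cases h16 : dim = 16
    · subst h16; decide
    · simp [build_joint_labels, build_joint_labels_alt, h14, h16]
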